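-- pv_equiv track=rewrite | github.com/Stapeey/Snakegame-python | main.py | create_snake_body
-- ===== SOURCE A (Python) =====
-- def create_snake_body(lista):
--     lista = lista[::-1]
--     a = 0 ; b = 1
--     for i in lista:
--         if a == len(lista)-1:
--             break
--         lista[a]=lista[b]
--         a += 1 ; b+=1
--     return lista[::-1]
-- ===== SOURCE B (Python) =====
-- def create_snake_body(lista):
--     return lista[:1] + lista[:-1]
-- ===== Notes on version B (the rewrite author's own statement) =====
-- stated objective: simpler
-- what changed: Replaced the reverse/shift-loop/reverse with a single closed-form slice expression [first element] + all-but-last.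
import Mathlib
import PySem

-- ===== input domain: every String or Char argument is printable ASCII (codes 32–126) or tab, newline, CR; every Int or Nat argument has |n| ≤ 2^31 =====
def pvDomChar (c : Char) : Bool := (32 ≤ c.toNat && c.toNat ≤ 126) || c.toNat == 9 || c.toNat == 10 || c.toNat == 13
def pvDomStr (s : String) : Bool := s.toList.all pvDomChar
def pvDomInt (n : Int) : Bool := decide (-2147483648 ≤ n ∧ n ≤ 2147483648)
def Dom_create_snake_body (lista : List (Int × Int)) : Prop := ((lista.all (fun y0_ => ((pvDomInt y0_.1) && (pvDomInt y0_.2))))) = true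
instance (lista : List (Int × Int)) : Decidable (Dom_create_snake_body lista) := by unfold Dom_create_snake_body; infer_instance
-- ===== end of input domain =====

-- B replaces A's reverse / in-place shift loop / reverse with the closed-form slice
-- lista[:1] + lista[:-1] (objective: simpler).

-- ===== PORT A =====
-- the 'for i in lista' loop: fuel = number of elements of the (reversed) list at loop
-- entry; each iteration either breaks (a == len-1) or writes lista[a] = lista[b].
-- lista[b] is read with getD; whenever the loop reads it, b is in range (b = a+1 < len).
def create_snake_body_go (lista : List (Int × Int)) (a b : Nat) (fuel : Nat) :
    List (Int × Int) :=
  match fuel with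
  | 0 => lista
  | fuel + 1 =>
    if a = lista.length - 1 then lista
    else
      create_snake_body_go (lista.set a (lista.getD b (0, 0))) (a + 1) (b + 1) fuel

def create_snake_body (lista : List (Int × Int)) : List (Int × Int) :=
  -- lista = lista[::-1]; run the loop; return lista[::-1]
  (create_snake_body_go lista.reverse 0 1 lista.reverse.length).reverse

-- ===== PORT B =====
def create_snake_body_alt (lista : List (Int × Int)) : List (Int × Int) :=
  lista.take 1 ++ lista.dropLast      -- lista[:1] + lista[:-1]

-- ===== PRECONDITION & SPEC =====
def Spec_create_snake_body (lista : List (Int × Int)) (out : List (Int × Int)) : Prop := out = create_snake_body_alt lista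
instance (lista : List (Int × Int)) (out : List (Int × Int)) : Decidable (Spec_create_snake_body lista out) := by unfold Spec_create_snake_body; infer_instance

-- ===== CLAIM (what is proved, stated in full; the proofs are below) =====
def Claim_equal_create_snake_body : Prop := ∀ (lista : List (Int × Int)), Dom_create_snake_body lista → Spec_create_snake_body lista (create_snake_body lista)

-- ===== LEMMAS AND PROOFS =====

-- Loop invariant: with processed prefix p and remaining x :: t, the loop shifts the
-- remaining part left by one, duplicating nothing but keeping the last element.
theorem create_snake_body_go_spec :
    ∀ (fuel : Nat) (p : List (Int × Int)) (x : Int × Int) (t : List (Int × Int)),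
      t.length + 1 ≤ fuel →
      create_snake_body_go (p ++ x :: t) p.length (p.length + 1) fuel
        = p ++ (t ++ [(x :: t).getLastD (0, 0)]) := by
  intro fuel
  induction fuel with
  | zero => intro p x t h; omega
  | succ fuel ih =>
    intro p x t h
    match t with
    | [] =>
      simp [create_snake_body_go]
    | y :: t' =>
      have hne : ¬ p.length = (p ++ x :: y :: t').length - 1 := by
        simp only [List.length_append, List.length_cons]; omega
      rw [create_snake_body_go, if_neg hne]
      have hget : (p ++ x :: y :: t').getD (p.length + 1) (0, 0) = y := by
        simp [List.getD_eq_getElem?_getD]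
      have hset : (p ++ x :: y :: t').set p.length y = (p ++ [y]) ++ y :: t' := by
        rw [List.set_append_right _ _ (le_refl _)]
        simp
      rw [hget, hset]
      have := ih (p ++ [y]) y t' (by simp at h ⊢; omega)
      simp only [List.length_append, List.length_cons, List.length_nil] at this ⊢
      rw [show p.length + 1 = p.length + (0 + 1) from by omega] at this ⊢
      rw [this]
      simp

-- ===== VERDICT (by name: the statement is the Claim_ definition above) =====
theorem create_snake_body_spec : Claim_equal_create_snake_body := by
  intro lista _
  unfold Spec_create_snake_body create_snake_body create_snake_body_alt
  match lista with
  | [] => simp [create_snake_body_go]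
  | h :: t =>
    obtain ⟨x, r, hx⟩ : ∃ x r, (h :: t).reverse = x :: r := by
      cases hr : (h :: t).reverse with
      | nil => exact absurd hr (by simp)
      | cons a b => exact ⟨a, b, rfl⟩
    rw [hx]
    have hgo := create_snake_body_go_spec (x :: r).length [] x r (by simp)
    simp only [List.nil_append, List.length_nil] at hgo
    rw [show (0 : Nat) + 1 = 1 from rfl] at hgo
    rw [hgo]
    have hlast : (x :: r).getLast? = some h := by
      rw [← hx, List.getLast?_reverse]; rfl
    have htail : r.reverse = (h :: t).dropLast := by
      have h2 : (h :: t).reverse.tail = (h :: t).dropLast.reverse := List.tail_reverse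
      rw [hx, List.tail_cons] at h2
      rw [h2, List.reverse_reverse]
    rw [List.reverse_append, htail]
    simp [List.getLastD_eq_getLast?, hlast]
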